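-- pv_equiv track=rewrite | github.com/Build-Up-1214/Algorithm-Study | hyeongiii/PRG/brute-force search/Lv1_모의고사.py | solution
-- ===== SOURCE A (Python) =====
-- def solution(answers):
--     answer = []
--     s1 = [1, 2, 3, 4, 5]
--     s2 = [2, 1, 2, 3, 2, 4, 2, 5]
--     s3 = [3, 3, 1, 1, 2, 2, 4, 4, 5, 5]
--     cnt = [0, 0, 0]
--
--     # enumerate() : 인덱스(index)와 원소를 동시에 접근하면서 루프를 돌릴 수 있음
--     for idx, ans in enumerate(answers):
--         if ans == s1[idx % len(s1)]:
--             cnt[0] += 1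
--         if ans == s2[idx % len(s2)]:
--             cnt[1] += 1
--         if ans == s3[idx % len(s3)]:
--             cnt[2] += 1
--
--     for idx, val in enumerate(cnt):
--         if val == max(cnt):
--             answer.append(idx + 1)
--
--     return answer
-- ===== SOURCE B (Python) =====
-- def solution(answers):
--     # Histogram approach: one pass builds a frequency table keyed by
--     # (index mod 40, answer) -- 40 = lcm of the three pattern periods --
--     # then each score is read off the 40-entry table without rescanning answers.
--     hist = {}
--     for k in [(i % 40, a) for i, a in enumerate(answers)]:
--         hist[k] = hist.get(k, 0) + 1
--     tiled = [[1, 2, 3, 4, 5] * 8,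
--              [2, 1, 2, 3, 2, 4, 2, 5] * 5,
--              [3, 3, 1, 1, 2, 2, 4, 4, 5, 5] * 4]
--     scores = [sum(hist.get((r, t[r]), 0) for r in range(40)) for t in tiled]
--     best = max(scores)
--     return [k + 1 for k in range(3) if scores[k] == best]
-- ===== Notes on version B (the rewrite author's own statement) =====
-- stated objective: alternative
-- what changed: Replaces A's per-element pattern comparisons with a histogram: one pass builds a dict keyed by (index mod 40, answer) (40 = lcm of the pattern periods), each score is then read off the 40-entry table without rescanning the answers.
import Mathlib
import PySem

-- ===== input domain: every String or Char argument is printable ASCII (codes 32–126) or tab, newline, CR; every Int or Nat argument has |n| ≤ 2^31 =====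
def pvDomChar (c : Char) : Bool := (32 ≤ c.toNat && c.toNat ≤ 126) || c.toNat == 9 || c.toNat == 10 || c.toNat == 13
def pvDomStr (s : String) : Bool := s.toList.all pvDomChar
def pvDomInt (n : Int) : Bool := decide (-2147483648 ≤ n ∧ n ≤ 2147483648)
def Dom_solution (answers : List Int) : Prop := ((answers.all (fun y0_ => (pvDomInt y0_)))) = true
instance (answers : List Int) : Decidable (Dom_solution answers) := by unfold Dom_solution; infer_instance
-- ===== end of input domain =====

-- B replaces A's per-element pattern comparisons with a histogram keyed by (index mod 40, answer);
-- scores are read off the 40-entry table without rescanning answers (alternative algorithm, same cost).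

-- ===== PORT A =====
def solution (answers : List Int) : List Int :=
  let s1 : List Int := [1, 2, 3, 4, 5]
  let s2 : List Int := [2, 1, 2, 3, 2, 4, 2, 5]
  let s3 : List Int := [3, 3, 1, 1, 2, 2, 4, 4, 5, 5]
  let cnt : List Int := [0, 0, 0]
  -- first for-loop; indices idx % len(s) are always in range, so pyGetD/pySetD are exact here
  let cnt := (PySem.List.enumerate answers).foldl (fun cnt p =>
    let cnt := if p.2 == PySem.List.pyGetD s1 (PySem.Int.mod p.1 5) 0 then
                 PySem.List.pySetD cnt 0 (PySem.List.pyGetD cnt 0 0 + 1) else cnt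
    let cnt := if p.2 == PySem.List.pyGetD s2 (PySem.Int.mod p.1 8) 0 then
                 PySem.List.pySetD cnt 1 (PySem.List.pyGetD cnt 1 0 + 1) else cnt
    if p.2 == PySem.List.pyGetD s3 (PySem.Int.mod p.1 10) 0 then
      PySem.List.pySetD cnt 2 (PySem.List.pyGetD cnt 2 0 + 1) else cnt) cnt
  -- second for-loop; cnt is non-empty so max(cnt) never raises and .getD 0 is exact
  (PySem.List.enumerate cnt).foldl (fun answer p =>
    if p.2 == (PySem.List.max? cnt (fun y => y)).getD 0 then answer ++ [p.1 + 1] else answer) []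

-- ===== PORT B =====
def solution_alt (answers : List Int) : List Int :=
  -- hist: for k in [(i % 40, a) for i, a in enumerate(answers)]: hist[k] = hist.get(k, 0) + 1
  let keyed := (PySem.List.enumerate answers).map (fun q => (PySem.Int.mod q.1 40, q.2))
  let hist := keyed.foldl (fun d k => d.insert k (d.getD k 0 + 1))
                (PySem.Dict.empty : PySem.Dict (Int × Int) Int)
  let tiled : List (List Int) :=
    [PySem.List.pyRepeat [1, 2, 3, 4, 5] 8,
     PySem.List.pyRepeat [2, 1, 2, 3, 2, 4, 2, 5] 5,
     PySem.List.pyRepeat [3, 3, 1, 1, 2, 2, 4, 4, 5, 5] 4]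
  -- r runs over range(40), so t[r] is in range and pyGetD is exact
  let scores := tiled.map (fun t =>
    ((PySem.List.pyRange 0 40 1).map (fun r => hist.getD (r, PySem.List.pyGetD t r 0) 0)).sum)
  let best := (PySem.List.max? scores (fun y => y)).getD 0
  ((PySem.List.pyRange 0 3 1).filter (fun k => PySem.List.pyGetD scores k 0 == best)).map
    (fun k => k + 1)

-- ===== PRECONDITION & SPEC =====
def Spec_solution (answers : List Int) (out : List Int) : Prop := out = solution_alt answers
instance (answers : List Int) (out : List Int) : Decidable (Spec_solution answers out) := by unfold Spec_solution; infer_instance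

-- ===== CLAIM (what is proved, stated in full; the proofs are below) =====
def Claim_equal_solution : Prop := ∀ (answers : List Int), Dom_solution answers → Spec_solution answers (solution answers)

-- ===== LEMMAS AND PROOFS =====

-- A's loop body, named for the proofs (definitionally equal to the lambda in `solution`)
def pvStepA (cnt : List Int) (p : Int × Int) : List Int :=
  let cnt := if p.2 == PySem.List.pyGetD [(1:Int), 2, 3, 4, 5] (PySem.Int.mod p.1 5) 0 then
               PySem.List.pySetD cnt 0 (PySem.List.pyGetD cnt 0 0 + 1) else cnt
  let cnt := if p.2 == PySem.List.pyGetD [(2:Int), 1, 2, 3, 2, 4, 2, 5] (PySem.Int.mod p.1 8) 0 then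
               PySem.List.pySetD cnt 1 (PySem.List.pyGetD cnt 1 0 + 1) else cnt
  if p.2 == PySem.List.pyGetD [(3:Int), 3, 1, 1, 2, 2, 4, 4, 5, 5] (PySem.Int.mod p.1 10) 0 then
    PySem.List.pySetD cnt 2 (PySem.List.pyGetD cnt 2 0 + 1) else cnt

theorem pvStepA_eval (c1 c2 c3 s a : Int) :
    pvStepA [c1, c2, c3] (s, a) =
      [if a == PySem.List.pyGetD [(1:Int), 2, 3, 4, 5] (PySem.Int.mod s 5) 0 then c1 + 1 else c1,
       if a == PySem.List.pyGetD [(2:Int), 1, 2, 3, 2, 4, 2, 5] (PySem.Int.mod s 8) 0 then c2 + 1 else c2,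
       if a == PySem.List.pyGetD [(3:Int), 3, 1, 1, 2, 2, 4, 4, 5, 5] (PySem.Int.mod s 10) 0 then c3 + 1 else c3] := by
  unfold pvStepA
  split_ifs <;> rfl

-- A's per-pattern match count, as a countP over the enumerated answers
def pvN (p : List Int) (L : Int) (answers : List Int) (s : Int) : Int :=
  ((PySem.List.enumerate answers s).countP
    (fun q => q.2 == PySem.List.pyGetD p (PySem.Int.mod q.1 L) 0) : Int)

theorem pvN_cons (p : List Int) (L : Int) (a : Int) (t : List Int) (s : Int) :
    pvN p L (a :: t) s =
      pvN p L t (s + 1) + (if a == PySem.List.pyGetD p (PySem.Int.mod s L) 0 then 1 else 0) := by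
  simp only [pvN, PySem.List.enumerate_cons, List.countP_cons]
  push_cast
  split_ifs <;> simp

-- A's counting loop computes the three independent match counts
theorem pvCnt_eq (answers : List Int) : ∀ (s c1 c2 c3 : Int),
    List.foldl pvStepA [c1, c2, c3] (PySem.List.enumerate answers s) =
    [c1 + pvN [1, 2, 3, 4, 5] 5 answers s,
     c2 + pvN [2, 1, 2, 3, 2, 4, 2, 5] 8 answers s,
     c3 + pvN [3, 3, 1, 1, 2, 2, 4, 4, 5, 5] 10 answers s] := by
  induction answers with
  | nil => intro s c1 c2 c3; simp [pvN, PySem.List.enumerate_nil]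
  | cons a t ih =>
    intro s c1 c2 c3
    rw [PySem.List.enumerate_cons, List.foldl_cons, pvStepA_eval, ih (s + 1),
        pvN_cons, pvN_cons, pvN_cons]
    split_ifs <;> norm_num <;> ring_nf <;> trivial

-- the sum over the 40 residues of one (r, value)-indicator is one match indicator
theorem pvIndSum (t : Int → Int) (q : Int × Int) (hq : q.1 ∈ PySem.List.pyRange 0 40 1) :
    ((PySem.List.pyRange 0 40 1).map (fun r => if (q == (r, t r)) then (1 : Int) else 0)).sum
      = if (q.2 == t q.1) then 1 else 0 := by
  obtain ⟨r0, a⟩ := q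
  by_cases h : a = t r0
  · rw [List.map_congr_left (g := fun r => if ((fun r => r == r0) r) then (1 : Int) else 0) ?_]
    · rw [PySem.List.sum_map_ite_one_zero, ← List.count_eq_countP,
          List.count_eq_one_of_mem (by decide) hq]
      simp [h]
    · intro r _
      by_cases hr : r = r0
      · subst hr; simp [h]
      · simp [Prod.ext_iff, Ne.symm hr, hr]
  · rw [List.map_congr_left (g := fun _ => (0 : Int)) ?_]
    · simp [h]
    · intro r _
      by_cases hr : r = r0
      · subst hr; simp [Prod.ext_iff, h]
      · simp [Prod.ext_iff, Ne.symm hr]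

-- summing the histogram counts over the 40 residue slots counts the matches
theorem pvSumCount (t : Int → Int) :
    ∀ (l : List (Int × Int)), (∀ q ∈ l, q.1 ∈ PySem.List.pyRange 0 40 1) →
      ((PySem.List.pyRange 0 40 1).map (fun r => (List.count (r, t r) l : Int))).sum
        = (List.countP (fun q => q.2 == t q.1) l : Int) := by
  intro l
  induction l with
  | nil => intro _; simp
  | cons q l ih =>
    intro h
    have hq := h q (List.mem_cons_self ..)
    have hl : ∀ x ∈ l, x.1 ∈ PySem.List.pyRange 0 40 1 :=
      fun x hx => h x (List.mem_cons_of_mem _ hx)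
    rw [List.map_congr_left
          (g := fun r => (List.count (r, t r) l : Int) + (if (q == (r, t r)) then (1 : Int) else 0)) ?_]
    · rw [PySem.List.sum_map_add_int, ih hl, pvIndSum t q hq, List.countP_cons]
      push_cast
      split_ifs <;> simp
    · intro r _
      rw [List.count_cons]
      push_cast
      split_ifs <;> simp

-- mod of the residue: i % L = (i % 40) % L for L | 40
theorem pvModMod (i L : Int) (hL : 0 < L) (hdvd : L ∣ 40) :
    PySem.Int.mod i L = PySem.Int.mod (PySem.Int.mod i 40) L := by
  rw [PySem.Int.mod_eq_emod_of_pos hL, PySem.Int.mod_eq_emod_of_pos (by norm_num : (0:Int) < 40),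
      PySem.Int.mod_eq_emod_of_pos hL, Int.emod_emod_of_dvd _ hdvd]

-- the tiled 40-entry pattern read at i % 40 is the base pattern read at i % L
theorem pvBridge (tl p : List Int) (L : Int) (hL : 0 < L) (hdvd : L ∣ 40)
    (h : ∀ m : Int, 0 ≤ m → m < 40 →
      PySem.List.pyGetD tl m 0 = PySem.List.pyGetD p (PySem.Int.mod m L) 0) (i : Int) :
    PySem.List.pyGetD tl (PySem.Int.mod i 40) 0 = PySem.List.pyGetD p (PySem.Int.mod i L) 0 := by
  rw [pvModMod i L hL hdvd]
  exact h _ (PySem.Int.mod_nonneg i (by norm_num)) (PySem.Int.mod_lt i (by norm_num))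

theorem pvT1 : ∀ m : Int, 0 ≤ m → m < 40 →
    PySem.List.pyGetD (PySem.List.pyRepeat [1, 2, 3, 4, 5] 8) m 0
      = PySem.List.pyGetD [(1:Int), 2, 3, 4, 5] (PySem.Int.mod m 5) 0 := by
  intro m h0 h1; interval_cases m <;> rfl

theorem pvT2 : ∀ m : Int, 0 ≤ m → m < 40 →
    PySem.List.pyGetD (PySem.List.pyRepeat [2, 1, 2, 3, 2, 4, 2, 5] 5) m 0
      = PySem.List.pyGetD [(2:Int), 1, 2, 3, 2, 4, 2, 5] (PySem.Int.mod m 8) 0 := by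
  intro m h0 h1; interval_cases m <;> rfl

theorem pvT3 : ∀ m : Int, 0 ≤ m → m < 40 →
    PySem.List.pyGetD (PySem.List.pyRepeat [3, 3, 1, 1, 2, 2, 4, 4, 5, 5] 4) m 0
      = PySem.List.pyGetD [(3:Int), 3, 1, 1, 2, 2, 4, 4, 5, 5] (PySem.Int.mod m 10) 0 := by
  intro m h0 h1; interval_cases m <;> rfl

-- one histogram-table score equals A's match count for that pattern
theorem pvScore_eq (answers : List Int) (tl p : List Int) (L : Int) (hL : 0 < L) (hdvd : L ∣ 40)
    (h : ∀ m : Int, 0 ≤ m → m < 40 →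
      PySem.List.pyGetD tl m 0 = PySem.List.pyGetD p (PySem.Int.mod m L) 0) :
    ((PySem.List.pyRange 0 40 1).map (fun r =>
        (List.count (r, PySem.List.pyGetD tl r 0)
          ((PySem.List.enumerate answers 0).map (fun q => (PySem.Int.mod q.1 40, q.2))) : Int))).sum
      = pvN p L answers 0 := by
  rw [pvSumCount (fun r => PySem.List.pyGetD tl r 0) _ ?_]
  · unfold pvN
    rw [List.countP_map]
    congr 1
    apply List.countP_congr
    intro q _
    simp only [Function.comp]
    rw [pvBridge tl p L hL hdvd h q.1]
  · intro q hq
    obtain ⟨x, _, rfl⟩ := List.mem_map.mp hq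
    exact PySem.List.mem_pyRange_one.mpr
      ⟨PySem.Int.mod_nonneg _ (by norm_num), PySem.Int.mod_lt _ (by norm_num)⟩

-- B reduced to the three match counts
theorem pvAlt_eq (answers : List Int) :
    solution_alt answers =
      ((PySem.List.pyRange 0 3 1).filter (fun k =>
          PySem.List.pyGetD
            [pvN [1, 2, 3, 4, 5] 5 answers 0,
             pvN [2, 1, 2, 3, 2, 4, 2, 5] 8 answers 0,
             pvN [3, 3, 1, 1, 2, 2, 4, 4, 5, 5] 10 answers 0] k 0
            == (PySem.List.max?
                  [pvN [1, 2, 3, 4, 5] 5 answers 0,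
                   pvN [2, 1, 2, 3, 2, 4, 2, 5] 8 answers 0,
                   pvN [3, 3, 1, 1, 2, 2, 4, 4, 5, 5] 10 answers 0] (fun y => y)).getD 0)).map
        (fun k => k + 1) := by
  unfold solution_alt
  simp only [List.map_cons, List.map_nil, PySem.Dict.getD_foldl_insert_add_one,
    PySem.Dict.getD_empty, zero_add]
  rw [pvScore_eq answers _ _ 5 (by norm_num) (by norm_num) pvT1,
      pvScore_eq answers _ _ 8 (by norm_num) (by norm_num) pvT2,
      pvScore_eq answers _ _ 10 (by norm_num) (by norm_num) pvT3]

-- the two output stages agree for any three counts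
theorem pvFinal_eq (c1 c2 c3 : Int) :
    List.foldl (fun answer p =>
        if p.2 == (PySem.List.max? [c1, c2, c3] (fun y => y)).getD 0
        then answer ++ [p.1 + 1] else answer) [] (PySem.List.enumerate [c1, c2, c3] 0) =
      ((PySem.List.pyRange 0 3 1).filter (fun k =>
          PySem.List.pyGetD [c1, c2, c3] k 0
            == (PySem.List.max? [c1, c2, c3] (fun y => y)).getD 0)).map (fun k => k + 1) := by
  generalize (PySem.List.max? [c1, c2, c3] (fun y => y)).getD 0 = m
  have h1 : PySem.List.enumerate [c1, c2, c3] 0 = [(0, c1), (1, c2), (2, c3)] := by rfl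
  have h2 : PySem.List.pyRange 0 3 1 = [0, 1, 2] := by rfl
  rw [h1, h2]
  simp only [List.foldl_cons, List.foldl_nil, List.filter_cons, List.filter_nil]
  have g0 : PySem.List.pyGetD [c1, c2, c3] 0 0 = c1 := rfl
  have g1 : PySem.List.pyGetD [c1, c2, c3] 1 0 = c2 := rfl
  have g2 : PySem.List.pyGetD [c1, c2, c3] 2 0 = c3 := rfl
  rw [g0, g1, g2]
  split_ifs <;> simp

theorem solution_eq_alt (answers : List Int) : solution answers = solution_alt answers := by
  show List.foldl
      (fun answer p =>
        if p.2 == (PySem.List.max? (List.foldl pvStepA [0, 0, 0] (PySem.List.enumerate answers 0)) (fun y => y)).getD 0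
        then answer ++ [p.1 + 1] else answer)
      [] (PySem.List.enumerate (List.foldl pvStepA [0, 0, 0] (PySem.List.enumerate answers 0)) 0)
    = solution_alt answers
  rw [pvCnt_eq answers 0 0 0 0, pvAlt_eq answers]
  simp only [zero_add]
  exact pvFinal_eq _ _ _

-- ===== VERDICT (by name: the statement is the Claim_ definition above) =====
theorem solution_spec : Claim_equal_solution := by
  intro answers _
  unfold Spec_solution
  exact solution_eq_alt answers
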